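-- pv_equiv track=rewrite | github.com/namecallfilter/lunar-chess | training/gen_pieces_data.py | fen_to_piece_list
-- ===== SOURCE A (Python) =====
-- def fen_to_piece_list(fen: str) -> list:
-- 	"""Convert FEN to list of (piece, row, col)."""
-- 	piece_map = {
-- 		"r": "bR",
-- 		"n": "bN",
-- 		"b": "bB",
-- 		"q": "bQ",
-- 		"k": "bK",
-- 		"p": "bP",
-- 		"R": "wR",
-- 		"N": "wN",
-- 		"B": "wB",
-- 		"Q": "wQ",
-- 		"K": "wK",
-- 		"P": "wP",
-- 	}
--
-- 	board_fen = fen.split()[0]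
-- 	pieces = []
--
-- 	for row_idx, row in enumerate(board_fen.split("/")):
-- 		col_idx = 0
-- 		for char in row:
-- 			if char.isdigit():
-- 				col_idx += int(char)
-- 			else:
-- 				pieces.append((piece_map[char], row_idx, col_idx))
-- 				col_idx += 1
--
-- 	return pieces
-- ===== SOURCE B (Python) =====
-- def fen_to_piece_list(fen: str) -> list:
-- 	"""Convert FEN to list of (piece, row, col) by materializing each rank as an expanded square list."""
-- 	piece_map = {
-- 		"r": "bR",
-- 		"n": "bN",
-- 		"b": "bB",
-- 		"q": "bQ",
-- 		"k": "bK",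
-- 		"p": "bP",
-- 		"R": "wR",
-- 		"N": "wN",
-- 		"B": "wB",
-- 		"Q": "wQ",
-- 		"K": "wK",
-- 		"P": "wP",
-- 	}
--
-- 	board_fen = fen.split()[0]
-- 	pieces = []
--
-- 	for row_idx, row in enumerate(board_fen.split("/")):
-- 		expanded = []
-- 		for char in row:
-- 			if char.isdigit():
-- 				expanded.extend([None] * int(char))
-- 			else:
-- 				expanded.append(char)
-- 		for col, cell in enumerate(expanded):
-- 			if cell is not None:
-- 				pieces.append((piece_map[cell], row_idx, col))
--
-- 	return pieces
-- ===== Notes on version B (the rewrite author's own statement) =====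
-- stated objective: alternative
-- what changed: Replaces A's running col_idx accumulator with a materialized per-rank square list (None for empty squares, the char for pieces) that is then enumerated once, so a piece's column is its position in the expanded list; on the printable-ASCII domain the claims cover, Pre_ excludes exactly the inputs where A raises (IndexError when fen has no whitespace-separated token, KeyError on board characters that are neither digits, rank separators, nor piece letters), and B raises identically there.
import Mathlib
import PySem

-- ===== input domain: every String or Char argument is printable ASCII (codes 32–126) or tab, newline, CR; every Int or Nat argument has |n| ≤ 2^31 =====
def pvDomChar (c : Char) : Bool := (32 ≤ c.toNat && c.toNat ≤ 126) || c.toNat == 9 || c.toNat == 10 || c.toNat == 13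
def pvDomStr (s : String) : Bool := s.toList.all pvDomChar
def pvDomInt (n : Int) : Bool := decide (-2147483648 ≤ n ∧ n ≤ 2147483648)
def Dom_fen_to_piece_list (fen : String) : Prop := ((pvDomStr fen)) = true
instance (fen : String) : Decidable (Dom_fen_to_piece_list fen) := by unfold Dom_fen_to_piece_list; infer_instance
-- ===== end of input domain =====

-- B replaces A's running col_idx accumulator with a materialized per-rank square list that is
-- enumerated once (objective: alternative decomposition, same cost). Where the Python A raises
-- (IndexError/KeyError), B raises identically; those inputs are outside Pre_.

-- ===== PORT A =====
-- the piece_map dict literal shared by both Pythons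
def pvPieceMap : PySem.Dict Char String :=
  PySem.Dict.ofList [('r', "bR"), ('n', "bN"), ('b', "bB"), ('q', "bQ"), ('k', "bK"), ('p', "bP"),
                     ('R', "wR"), ('N', "wN"), ('B', "wB"), ('Q', "wQ"), ('K', "wK"), ('P', "wP")]

-- piece_map[char]; Python raises KeyError on a miss — exactly those inputs are outside Pre_
def pvLookup (c : Char) : String := PySem.Dict.getD pvPieceMap c ""

-- A's inner loop: running col_idx, appending to the shared pieces accumulator
def pvInnerA (r : Int) : List Char → Int → List (String × Int × Int) → List (String × Int × Int)
  | [], _, acc => acc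
  | c :: cs, col, acc =>
    if c.isDigit then pvInnerA r cs (col + ((c.toNat : Int) - 48)) acc
    else pvInnerA r cs (col + 1) (acc ++ [(pvLookup c, r, col)])

def fen_to_piece_list (fen : String) : List (String × Int × Int) :=
  let board := (PySem.Str.split₀ fen).headD ""   -- fen.split()[0]; [] raises IndexError (outside Pre_)
  (PySem.List.enumerate ((PySem.Str.split? board "/").getD []) 0).foldl
    (fun acc p => pvInnerA p.1 p.2.toList 0 acc) []

-- ===== PORT B =====
-- expand a rank to one entry per square: `none` for empty squares, the char for a piece
def pvExpandRow : List Char → List (Option Char)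
  | [] => []
  | c :: cs => (if c.isDigit then List.replicate (c.toNat - 48) none else [some c]) ++ pvExpandRow cs

def fen_to_piece_list_alt (fen : String) : List (String × Int × Int) :=
  let board := (PySem.Str.split₀ fen).headD ""   -- fen.split()[0]; [] raises IndexError (outside Pre_)
  (PySem.List.enumerate ((PySem.Str.split? board "/").getD []) 0).foldl
    (fun acc p =>
      (PySem.List.enumerate (pvExpandRow p.2.toList) 0).foldl
        (fun a q =>
          match q.2 with
          | some c => a ++ [(pvLookup c, p.1, q.1)]
          | none => a) acc) []

-- ===== PRECONDITION & SPEC =====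
-- Within the printable-ASCII domain Dom that all claims here are restricted to, Pre_ excludes
-- exactly the inputs on which the Python A raises: fen with no whitespace-separated token
-- (IndexError on the first subscript) and board characters that are neither ASCII digits, rank
-- separators, nor piece letters (KeyError on the dict lookup); B raises identically on all of
-- them, and outside Dom (e.g. non-ASCII digit characters) nothing is claimed.
def Pre_fen_to_piece_list (fen : String) : Prop :=
  PySem.Str.split₀ fen ≠ [] ∧
    ((PySem.Str.split₀ fen).headD "").toList.all
      (fun c => c.isDigit || ['/', 'r', 'n', 'b', 'q', 'k', 'p', 'R', 'N', 'B', 'Q', 'K', 'P'].contains c) = true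
instance (fen : String) : Decidable (Pre_fen_to_piece_list fen) := by
  unfold Pre_fen_to_piece_list; infer_instance

def pvWitness_fen_to_piece_list : String := "k1K/3p w"

def Spec_fen_to_piece_list (fen : String) (out : List (String × Int × Int)) : Prop :=
  out = fen_to_piece_list_alt fen
instance (fen : String) (out : List (String × Int × Int)) : Decidable (Spec_fen_to_piece_list fen out) := by
  unfold Spec_fen_to_piece_list; infer_instance

-- ===== CLAIM (what is proved, stated in full; the proofs are below) =====
def Claim_equal_fen_to_piece_list : Prop :=
  ∀ (fen : String), Dom_fen_to_piece_list fen → Pre_fen_to_piece_list fen →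
    Spec_fen_to_piece_list fen (fen_to_piece_list fen)

-- ===== LEMMAS AND PROOFS =====

-- common emission function both inner loops are proved equal to
def pvEmit (r : Int) : List (Option Char) → Int → List (String × Int × Int)
  | [], _ => []
  | none :: t, col => pvEmit r t (col + 1)
  | some c :: t, col => (pvLookup c, r, col) :: pvEmit r t (col + 1)

lemma pvEmit_replicate (r : Int) (n : Nat) (t : List (Option Char)) (col : Int) :
    pvEmit r (List.replicate n none ++ t) col = pvEmit r t (col + n) := by
  induction n generalizing col with
  | zero => simp
  | succ m ih =>
    rw [List.replicate_succ, List.cons_append]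
    show pvEmit r (List.replicate m none ++ t) (col + 1) = _
    rw [ih]; congr 1; push_cast; ring

lemma pvDigit_bounds {c : Char} (h : c.isDigit = true) : 48 ≤ c.toNat ∧ c.toNat ≤ 57 := by
  simp [Char.isDigit, decide_eq_true_eq] at h
  exact h

lemma pvInnerA_eq_emit (r : Int) (cs : List Char) (col : Int) (acc : List (String × Int × Int)) :
    pvInnerA r cs col acc = acc ++ pvEmit r (pvExpandRow cs) col := by
  induction cs generalizing col acc with
  | nil => simp [pvInnerA, pvExpandRow, pvEmit]
  | cons c t ih =>
    by_cases hd : c.isDigit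
    · have hb := pvDigit_bounds hd
      have hcast : ((c.toNat : Int) - 48) = ((c.toNat - 48 : Nat) : Int) := by omega
      simp only [pvInnerA, pvExpandRow, hd, if_true, ih, pvEmit_replicate, hcast]
    · simp only [pvInnerA, pvExpandRow, hd, if_false, Bool.false_eq_true,
        List.singleton_append, pvEmit, ih]
      simp

lemma pvInnerB_eq_emit (r : Int) (l : List (Option Char)) (s : Int)
    (acc : List (String × Int × Int)) :
    (PySem.List.enumerate l s).foldl
        (fun a q => match q.2 with
          | some c => a ++ [(pvLookup c, r, q.1)]
          | none => a) acc
      = acc ++ pvEmit r l s := by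
  induction l generalizing s acc with
  | nil => simp [PySem.List.enumerate_nil, pvEmit]
  | cons o t ih =>
    rw [PySem.List.enumerate_cons]
    cases o with
    | none => simp only [List.foldl_cons, ih, pvEmit]
    | some c => simp only [List.foldl_cons, ih, pvEmit]; simp

-- ===== VERDICT (by name: the statement is the Claim_ definition above) =====
theorem fen_to_piece_list_spec : Claim_equal_fen_to_piece_list := by
  intro fen _ _
  unfold Spec_fen_to_piece_list fen_to_piece_list fen_to_piece_list_alt
  apply PySem.List.foldl_congr_mem
  intro acc p _
  rw [pvInnerB_eq_emit, pvInnerA_eq_emit]
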